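-- pv_equiv track=rewrite | github.com/felipe-jimenez-ai/mentoria | app.py | clean_latex
-- ===== SOURCE A (Python) =====
-- def clean_latex(text):
--     """Remove LaTeX formatting from text"""
--     # Remove LaTeX math mode delimiters
--     text = text.replace('$', '').replace('\\', '')
--     # Remove common LaTeX commands
--     latex_commands = [
--         '\n', '\t', '\r', '\f', '\v',
--         r'\textbf', r'\textit', r'\emph', r'\text',
--         r'\begin', r'\end', r'\[', r'\]', r'\left', r'\right'
--     ]
--     for cmd in latex_commands:
--         text = text.replace(cmd, '')
--     return text
-- ===== SOURCE B (Python) =====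
-- def clean_latex(text):
--     """Remove LaTeX formatting from text"""
--     drop = set('$\\\n\t\r\f\v')
--     return ''.join(c for c in text if c not in drop)
-- ===== Notes on version B (the rewrite author's own statement) =====
-- stated objective: simpler
-- what changed: A makes 17 independent str.replace passes (the multi-char LaTeX-command passes being dead code once backslashes are removed); B is a single filtered traversal dropping the seven characters A actually deletes: dollar, backslash, newline, tab, CR, form feed, vertical tab.
import Mathlib
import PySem

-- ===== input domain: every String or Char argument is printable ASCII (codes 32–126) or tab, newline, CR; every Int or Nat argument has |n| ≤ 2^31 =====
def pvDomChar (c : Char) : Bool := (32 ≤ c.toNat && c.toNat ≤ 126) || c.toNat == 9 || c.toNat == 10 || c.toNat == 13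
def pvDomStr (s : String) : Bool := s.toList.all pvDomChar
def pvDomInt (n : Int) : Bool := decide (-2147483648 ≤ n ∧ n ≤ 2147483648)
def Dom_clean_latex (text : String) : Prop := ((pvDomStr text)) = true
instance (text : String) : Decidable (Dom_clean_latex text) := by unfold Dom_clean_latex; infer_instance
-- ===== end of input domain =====

-- B replaces A's sequence of independent str.replace passes by one filtered traversal
-- dropping the seven characters A actually deletes (objective: simpler; same exact output).

-- ===== PORT A =====
def latexCommands : List String :=
  ["\n", "\t", "\r", "\x0c", "\x0b",
   "\\textbf", "\\textit", "\\emph", "\\text",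
   "\\begin", "\\end", "\\[", "\\]", "\\left", "\\right"]

def clean_latex (text : String) : String :=
  let t := PySem.Str.replace (PySem.Str.replace text "$" "") "\\" ""
  latexCommands.foldl (fun t cmd => PySem.Str.replace t cmd "") t

-- ===== PORT B =====
def dropChars : List Char := ['$', '\\', '\n', '\t', '\r', '\x0c', '\x0b']

def clean_latex_alt (text : String) : String :=
  String.ofList (text.toList.filter (fun c => !dropChars.contains c))

-- ===== PRECONDITION & SPEC =====
def Spec_clean_latex (text : String) (out : String) : Prop := out = clean_latex_alt text
instance (text : String) (out : String) : Decidable (Spec_clean_latex text out) := by unfold Spec_clean_latex; infer_instance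

-- ===== CLAIM (what is proved, stated in full; the proofs are below) =====
def Claim_equal_clean_latex : Prop := ∀ (text : String), Dom_clean_latex text → Spec_clean_latex text (clean_latex text)

-- ===== LEMMAS AND PROOFS =====

-- replace.go with a single-char pattern and empty replacement filters that char out
theorem go_single (c : Char) : ∀ (fuel : Nat) (l acc : List Char), l.length ≤ fuel →
    PySem.Chars.replace.go [c] [] fuel l acc = acc.reverse ++ l.filter (· ≠ c) := by
  intro fuel
  induction fuel with
  | zero =>
    intro l acc h
    have : l = [] := List.eq_nil_of_length_eq_zero (Nat.le_zero.mp h)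
    subst this
    simp [PySem.Chars.replace.go]
  | succ f ih =>
    intro l acc h
    cases l with
    | nil => simp [PySem.Chars.replace.go]
    | cons x t =>
      by_cases hx : x = c
      · subst hx
        have hpre : List.isPrefixOf [x] (x :: t) = true := by
          simp [List.isPrefixOf]
        simp only [PySem.Chars.replace.go, hpre, if_pos, List.length_cons, List.length_nil,
          List.drop_succ_cons, List.drop_zero, List.reverse_nil, List.nil_append]
        rw [ih t acc (by simpa using Nat.le_of_succ_le_succ h)]
        simp
      · have hpre : List.isPrefixOf [c] (x :: t) = false := by
          simp [List.isPrefixOf]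
          exact fun hc => hx hc.symm
        simp only [PySem.Chars.replace.go, hpre]
        rw [ih t (x :: acc) (by simpa using Nat.le_of_succ_le_succ h)]
        simp [hx]

theorem replace_single (s : List Char) (c : Char) :
    PySem.Chars.replace s [c] [] = s.filter (· ≠ c) := by
  simp [PySem.Chars.replace, go_single c s.length s [] (le_refl _)]

-- replace is the identity when some character of the (nonempty) pattern does not occur
theorem go_id (old new : List Char) (d : Char) (hd : d ∈ old) :
    ∀ (fuel : Nat) (l acc : List Char), d ∉ l →
    PySem.Chars.replace.go old new fuel l acc = acc.reverse ++ l := by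
  intro fuel
  induction fuel with
  | zero => intro l acc _; simp [PySem.Chars.replace.go]
  | succ f ih =>
    intro l acc hnot
    cases l with
    | nil => simp [PySem.Chars.replace.go]
    | cons x t =>
      have hpre : List.isPrefixOf old (x :: t) = false := by
        by_contra hp
        have htrue : List.isPrefixOf old (x :: t) = true := by
          cases hh : List.isPrefixOf old (x :: t) with
          | false => exact absurd hh hp
          | true => rfl
        have : old <+: x :: t := List.isPrefixOf_iff_prefix.mp htrue
        exact hnot (this.subset hd)
      simp only [PySem.Chars.replace.go, hpre]
      rw [ih t (x :: acc) (fun h => hnot (List.mem_cons_of_mem _ h))]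
      simp

theorem replace_id (s old new : List Char) (d : Char) (hd : d ∈ old) (hs : d ∉ s) :
    PySem.Chars.replace s old new = s := by
  have hne : old.isEmpty = false := by
    cases old with
    | nil => cases hd
    | cons a b => rfl
  simp [PySem.Chars.replace, hne, go_id old new d hd s.length s [] hs]

-- filtering preserves non-membership
theorem not_mem_filter {c : Char} {s : List Char} {p : Char → Bool} (h : c ∉ s) :
    c ∉ s.filter p := fun hm => h (List.mem_filter.mp hm).1

-- the ten multi-character command passes are identities on a backslash-free list
theorem cmds_id (s : List Char) (hs : '\\' ∉ s) :
    PySem.Chars.replace (PySem.Chars.replace (PySem.Chars.replace (PySem.Chars.replace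
      (PySem.Chars.replace (PySem.Chars.replace (PySem.Chars.replace (PySem.Chars.replace
        (PySem.Chars.replace (PySem.Chars.replace
          s "\\textbf".toList []) "\\textit".toList []) "\\emph".toList [])
          "\\text".toList []) "\\begin".toList []) "\\end".toList [])
          "\\[".toList []) "\\]".toList []) "\\left".toList [])
          "\\right".toList [] = s := by
  rw [replace_id s _ _ '\\' (by decide) hs, replace_id s _ _ '\\' (by decide) hs,
      replace_id s _ _ '\\' (by decide) hs, replace_id s _ _ '\\' (by decide) hs,
      replace_id s _ _ '\\' (by decide) hs, replace_id s _ _ '\\' (by decide) hs,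
      replace_id s _ _ '\\' (by decide) hs, replace_id s _ _ '\\' (by decide) hs,
      replace_id s _ _ '\\' (by decide) hs, replace_id s _ _ '\\' (by decide) hs]

theorem clean_latex_spec : Claim_equal_clean_latex := by
  intro text _
  unfold Spec_clean_latex clean_latex clean_latex_alt latexCommands
  simp only [List.foldl_cons, List.foldl_nil, PySem.Str.replace]
  apply congrArg String.ofList
  simp only [String.toList_ofList]
  set ℓ := text.toList with hℓ
  rw [show ("" : String).toList = ([] : List Char) from rfl,
      show ("$" : String).toList = ['$'] from rfl,
      show ("\\" : String).toList = ['\\'] from rfl,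
      show ("\n" : String).toList = ['\n'] from rfl,
      show ("\t" : String).toList = ['\t'] from rfl,
      show ("\r" : String).toList = ['\r'] from rfl,
      show ("\x0c" : String).toList = ['\x0c'] from rfl,
      show ("\x0b" : String).toList = ['\x0b'] from rfl]
  rw [replace_single ℓ '$', replace_single _ '\\',
      replace_single _ '\n', replace_single _ '\t', replace_single _ '\r',
      replace_single _ '\x0c', replace_single _ '\x0b']
  -- after the '\\' pass no backslash remains, and the later filters keep it that way
  have hnb : '\\' ∉ ((ℓ.filter (· ≠ '$')).filter (· ≠ '\\')) := by
    intro hm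
    have := (List.mem_filter.mp hm).2
    simp at this
  have h5 : '\\' ∉ (((((((ℓ.filter (· ≠ '$')).filter (· ≠ '\\')).filter (· ≠ '\n')).filter
      (· ≠ '\t')).filter (· ≠ '\r')).filter (· ≠ '\x0c')).filter (· ≠ '\x0b')) :=
    not_mem_filter (not_mem_filter (not_mem_filter (not_mem_filter (not_mem_filter hnb))))
  rw [cmds_id _ h5]
  -- collapse the chain of filters into B's single filter
  simp only [List.filter_filter]
  apply List.filter_congr
  intro c _
  simp [dropChars]
  ac_rfl
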